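-- pv_equiv track=rewrite | github.com/danieleschmidt/rlhf-audit-trail | src/rlhf_audit_trail/privacy.py | _generate_audit_recommendations
-- ===== SOURCE A (Python) =====
-- from typing import Dict, List, Optional, Any, Tuple
--
-- def _generate_audit_recommendations(issues: List[Dict[str, Any]]) -> List[str]:
--     """Generate recommendations based on audit issues."""
--     recommendations = []
--
--     for issue in issues:
--         if issue["type"] == "budget_exhaustion_risk":
--             recommendations.append("Reduce epsilon consumption per operation")
--             recommendations.append("Implement more efficient privacy mechanisms")
--
--         elif issue["type"] == "k_anonymity_violation":
--             recommendations.append("Collect more annotations from each annotator")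
--             recommendations.append("Increase k-anonymity threshold if feasible")
--
--     if not issues:
--         recommendations.append("Privacy compliance is satisfactory")
--         recommendations.append("Continue current privacy protection measures")
--
--     return recommendations
-- ===== SOURCE B (Python) =====
-- from typing import Dict, List, Optional, Any, Tuple
--
-- def _issue_block(issue: Dict[str, Any]) -> List[str]:
--     """Recommendations contributed by a single issue."""
--     t = issue["type"]
--     if t == "budget_exhaustion_risk":
--         return ["Reduce epsilon consumption per operation",
--                 "Implement more efficient privacy mechanisms"]
--     if t == "k_anonymity_violation":
--         return ["Collect more annotations from each annotator",
--                 "Increase k-anonymity threshold if feasible"]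
--     return []
--
-- def _rec(rest: List[Dict[str, Any]]) -> List[str]:
--     """Structural recursion: head block followed by the recommendations of the tail."""
--     if not rest:
--         return []
--     return _issue_block(rest[0]) + _rec(rest[1:])
--
-- def _generate_audit_recommendations(issues: List[Dict[str, Any]]) -> List[str]:
--     if not issues:
--         return ["Privacy compliance is satisfactory",
--                 "Continue current privacy protection measures"]
--     return _rec(issues)
-- ===== Notes on version B (the rewrite author's own statement) =====
-- stated objective: alternative
-- what changed: Replaces A's imperative loop that mutates a shared accumulator (plus a post-loop empty patch) by a structural recursion that maps each issue to its own recommendation block and concatenates head block + recursive tail, with the empty case returned directly up front.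
import Mathlib
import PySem

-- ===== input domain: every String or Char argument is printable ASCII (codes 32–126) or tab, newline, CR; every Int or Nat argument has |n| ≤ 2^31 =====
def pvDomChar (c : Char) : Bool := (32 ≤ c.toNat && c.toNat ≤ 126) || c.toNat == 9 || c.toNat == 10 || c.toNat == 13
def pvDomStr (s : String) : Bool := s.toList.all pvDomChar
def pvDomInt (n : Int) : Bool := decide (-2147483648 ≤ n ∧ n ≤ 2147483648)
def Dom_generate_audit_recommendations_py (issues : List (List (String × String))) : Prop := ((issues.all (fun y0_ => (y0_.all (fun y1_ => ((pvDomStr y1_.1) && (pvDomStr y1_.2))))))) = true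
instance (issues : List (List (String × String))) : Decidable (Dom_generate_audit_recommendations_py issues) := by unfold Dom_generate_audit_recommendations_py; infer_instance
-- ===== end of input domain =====

-- B replaces A's accumulator loop (with a post-loop empty patch) by a structural recursion
-- concatenating per-issue blocks, with the empty case returned up front (alternative; same cost).


-- ===== PORT A =====
-- issue["type"] = first-match lookup in the association list; none = KeyError (excluded by Pre_).
def generate_audit_recommendations_py (issues : List (List (String × String))) : List String :=
  let recommendations : List String := []
  let recommendations := issues.foldl (fun recommendations issue =>
    match (PySem.Dict.mk issue).get? "type" with
    | some t =>
      if t = "budget_exhaustion_risk" then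
        recommendations ++ ["Reduce epsilon consumption per operation",
                            "Implement more efficient privacy mechanisms"]
      else if t = "k_anonymity_violation" then
        recommendations ++ ["Collect more annotations from each annotator",
                            "Increase k-anonymity threshold if feasible"]
      else recommendations
    | none => recommendations) recommendations
  if issues.isEmpty then
    recommendations ++ ["Privacy compliance is satisfactory",
                        "Continue current privacy protection measures"]
  else recommendations

-- ===== PORT B =====
-- Port of Source B's _issue_block: the recommendations contributed by one issue
-- (the `none` case is KeyError in Python, excluded by Pre_).
def issueBlock (issue : List (String × String)) : List String :=
  match (PySem.Dict.mk issue).get? "type" with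
  | some t =>
    if t = "budget_exhaustion_risk" then
      ["Reduce epsilon consumption per operation",
       "Implement more efficient privacy mechanisms"]
    else if t = "k_anonymity_violation" then
      ["Collect more annotations from each annotator",
       "Increase k-anonymity threshold if feasible"]
    else []
  | none => []

-- Port of Source B's _rec: head block ++ recursion on the tail.
def recRecs : List (List (String × String)) → List String
  | [] => []
  | issue :: rest => issueBlock issue ++ recRecs rest

def generate_audit_recommendations_py_alt (issues : List (List (String × String))) : List String :=
  if issues.isEmpty then
    ["Privacy compliance is satisfactory",
     "Continue current privacy protection measures"]
  else recRecs issues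

-- ===== PRECONDITION & SPEC =====
-- Pre_ excludes exactly the inputs where A raises KeyError: an issue dict without a "type" key.
def Pre_generate_audit_recommendations_py (issues : List (List (String × String))) : Prop :=
  ∀ issue ∈ issues, ((PySem.Dict.mk issue).get? "type").isSome = true
instance (issues : List (List (String × String))) : Decidable (Pre_generate_audit_recommendations_py issues) := by unfold Pre_generate_audit_recommendations_py; infer_instance
def pvWitness_generate_audit_recommendations_py : (List (List (String × String))) :=
  [[("type", "budget_exhaustion_risk")], [("type", "other")]]
def Spec_generate_audit_recommendations_py (issues : List (List (String × String))) (out : List String) : Prop := out = generate_audit_recommendations_py_alt issues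
instance (issues : List (List (String × String))) (out : List String) : Decidable (Spec_generate_audit_recommendations_py issues out) := by unfold Spec_generate_audit_recommendations_py; infer_instance

-- ===== CLAIM (what is proved, stated in full; the proofs are below) =====
def Claim_equal_generate_audit_recommendations_py : Prop := ∀ (issues : List (List (String × String))), Dom_generate_audit_recommendations_py issues → Pre_generate_audit_recommendations_py issues → Spec_generate_audit_recommendations_py issues (generate_audit_recommendations_py issues)

-- ===== LEMMAS AND PROOFS =====

-- A's accumulator step appends exactly B's per-issue block.
lemma step_eq (acc : List String) (issue : List (String × String)) :
    (match (PySem.Dict.mk issue).get? "type" with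
      | some t =>
        if t = "budget_exhaustion_risk" then
          acc ++ ["Reduce epsilon consumption per operation",
                  "Implement more efficient privacy mechanisms"]
        else if t = "k_anonymity_violation" then
          acc ++ ["Collect more annotations from each annotator",
                  "Increase k-anonymity threshold if feasible"]
        else acc
      | none => acc)
    = acc ++ issueBlock issue := by
  unfold issueBlock
  cases (PySem.Dict.mk issue).get? "type" with
  | none => simp
  | some t => simp only []; split_ifs <;> simp

-- A's whole fold equals B's recursion (both are the concatenation of the blocks).
lemma foldl_eq_recRecs (issues : List (List (String × String))) (acc : List String) :
    issues.foldl (fun recommendations issue =>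
      match (PySem.Dict.mk issue).get? "type" with
      | some t =>
        if t = "budget_exhaustion_risk" then
          recommendations ++ ["Reduce epsilon consumption per operation",
                              "Implement more efficient privacy mechanisms"]
        else if t = "k_anonymity_violation" then
          recommendations ++ ["Collect more annotations from each annotator",
                              "Increase k-anonymity threshold if feasible"]
        else recommendations
      | none => recommendations) acc
    = acc ++ recRecs issues := by
  induction issues generalizing acc with
  | nil => simp [recRecs]
  | cons issue rest ih =>
    simp only [List.foldl_cons, recRecs]
    rw [step_eq, ih, List.append_assoc]

-- ===== VERDICT (by name: the statement is the Claim_ definition above) =====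
theorem generate_audit_recommendations_py_spec : Claim_equal_generate_audit_recommendations_py := by
  intro issues _ _
  unfold Spec_generate_audit_recommendations_py
  unfold generate_audit_recommendations_py generate_audit_recommendations_py_alt
  cases issues with
  | nil => rfl
  | cons i rest =>
    simp only [List.isEmpty_cons, Bool.false_eq_true, if_false]
    rw [foldl_eq_recRecs]
    simp
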